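-- pv_equiv track=rewrite | github.com/SpoiledPotato/CU-Python | quiz-1/task-3.py | splitTuple
-- ===== SOURCE A (Python) =====
-- def splitTuple(t):
--     tuple_1 = ()
--     tuple_2 = ()
--     tuple_3 = ()
--     for i in t:
--         if i%2 == 0:
--             tuple_1 += (i,)
--         elif i%3 == 0:
--             tuple_3 += (i,)
--             tuple_2 += (i,)
--         else:
--             tuple_2 += (i,)
--     return tuple_1, tuple_2, tuple_3
-- ===== SOURCE B (Python) =====
-- def splitTuple(t):
--     tuple_1 = tuple(i for i in t if i % 2 == 0)
--     tuple_2 = tuple(i for i in t if i % 2 != 0)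
--     tuple_3 = tuple(i for i in t if i % 2 != 0 and i % 3 == 0)
--     return tuple_1, tuple_2, tuple_3
-- ===== Notes on version B (the rewrite author's own statement) =====
-- stated objective: faster
-- what changed: Replaces the single accumulating loop with quadratic tuple += appends by three independent linear filters over the input, one per output group.
import Mathlib
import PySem

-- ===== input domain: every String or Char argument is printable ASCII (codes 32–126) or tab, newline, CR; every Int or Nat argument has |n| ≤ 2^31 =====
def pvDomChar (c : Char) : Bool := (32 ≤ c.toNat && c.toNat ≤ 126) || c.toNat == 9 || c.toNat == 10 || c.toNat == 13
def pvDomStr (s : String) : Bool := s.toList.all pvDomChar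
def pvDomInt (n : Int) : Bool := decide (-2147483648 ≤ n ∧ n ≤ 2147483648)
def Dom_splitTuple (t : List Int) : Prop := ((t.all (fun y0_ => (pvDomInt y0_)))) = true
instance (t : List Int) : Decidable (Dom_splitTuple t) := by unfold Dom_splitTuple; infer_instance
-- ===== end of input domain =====

-- B computes each group by its own filter instead of A's single branching loop (objective: simpler).

-- ===== PORT A =====
-- literal port of A's loop body: if/elif/else appends on the three accumulators
def pvStepA (acc : List Int × List Int × List Int) (i : Int) : List Int × List Int × List Int :=
  let (t1, t2, t3) := acc
  if PySem.Int.mod i 2 = 0 then (t1 ++ [i], t2, t3)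
  else if PySem.Int.mod i 3 = 0 then (t1, t2 ++ [i], t3 ++ [i])
  else (t1, t2 ++ [i], t3)

def splitTuple (t : List Int) : List Int × List Int × List Int :=
  t.foldl pvStepA ([], [], [])

-- ===== PORT B =====
def splitTuple_alt (t : List Int) : List Int × List Int × List Int :=
  ( t.filter (fun i => PySem.Int.mod i 2 = 0),
    t.filter (fun i => PySem.Int.mod i 2 ≠ 0),
    t.filter (fun i => PySem.Int.mod i 2 ≠ 0 ∧ PySem.Int.mod i 3 = 0) )

-- ===== PRECONDITION & SPEC =====
def Spec_splitTuple (t : List Int) (out : List Int × List Int × List Int) : Prop := out = splitTuple_alt t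
instance (t : List Int) (out : List Int × List Int × List Int) : Decidable (Spec_splitTuple t out) := by unfold Spec_splitTuple; infer_instance

-- ===== CLAIM (what is proved, stated in full; the proofs are below) =====
def Claim_equal_splitTuple : Prop := ∀ (t : List Int), Dom_splitTuple t → Spec_splitTuple t (splitTuple t)

-- ===== LEMMAS AND PROOFS =====

-- loop invariant: A's fold starting from partial accumulators = accumulators ++ B's filters
lemma splitTuple_fold_inv (t : List Int) (a1 a2 a3 : List Int) :
    t.foldl pvStepA (a1, a2, a3)
    = ( a1 ++ t.filter (fun i => PySem.Int.mod i 2 = 0),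
        a2 ++ t.filter (fun i => PySem.Int.mod i 2 ≠ 0),
        a3 ++ t.filter (fun i => PySem.Int.mod i 2 ≠ 0 ∧ PySem.Int.mod i 3 = 0) ) := by
  induction t generalizing a1 a2 a3 with
  | nil => simp
  | cons x xs ih =>
    rw [List.foldl_cons]
    by_cases h2 : (2:Int) ∣ x
    · rw [show pvStepA (a1, a2, a3) x = (a1 ++ [x], a2, a3) by
        simp [pvStepA, h2], ih]
      simp [h2]
    · by_cases h3 : (3:Int) ∣ x
      · rw [show pvStepA (a1, a2, a3) x = (a1, a2 ++ [x], a3 ++ [x]) by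
          simp [pvStepA, h2, h3], ih]
        simp [List.filter_cons, h2, h3]
      · rw [show pvStepA (a1, a2, a3) x = (a1, a2 ++ [x], a3) by
          simp [pvStepA, h2, h3], ih]
        simp [List.filter_cons, h2, h3]

-- ===== VERDICT (by name: the statement is the Claim_ definition above) =====
theorem splitTuple_spec : Claim_equal_splitTuple := by
  intro t _
  show splitTuple t = splitTuple_alt t
  simpa [splitTuple, splitTuple_alt] using splitTuple_fold_inv t [] [] []
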